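-- pv_equiv track=rewrite | github.com/koliaok/TF_NADST | utils_s/utils_multiWOZ_DST.py | process_turn_belief_dict
-- ===== SOURCE A (Python) =====
-- def process_turn_belief_dict(turn_belief_dict, turn_domain_flow, ordered_slot):
--     domain_numslots_ls = []
--     slot_lenval_ls = []
--     slotval_ls = []
--     in_domain_ls = []
--     in_slot_ls = []
--     in_domainslot_ls = []
--     domain_numslots = {}
--     domainslot_lenval = {}
--     # (domain, #slot) processing
--     for k, v in turn_belief_dict.items():
--         d, s = k.split('-')
--         if d not in domain_numslots: domain_numslots[d] = 0
--         domain_numslots[d] += 1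
--         if d not in domainslot_lenval: domainslot_lenval[d] = []
--         domainslot_lenval[d].append((s, len(v.split())))
--     for d in turn_domain_flow:
--         if d in domain_numslots:
--             domain_numslots_ls.append((d, domain_numslots[d]))
--         else:
--             domain_numslots_ls.append((d, 0))  # for cases which domain is found but not slot i.e. police domain
--     # (slot, len_slotVal) processing
--     if ordered_slot == 'alphabetical':
--         for k, v in domainslot_lenval.items():
--             sorted_v = sorted(v, key=lambda tup: tup[0])
--             domainslot_lenval[k] = sorted_v
--     for dn in domain_numslots_ls:
--         domain, numslots = dn
--         for n in range(numslots):
--             slot_lenval_ls.append((domainslot_lenval[domain][n]))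
--             in_domain_ls.append(domain)
--     # (domain_slot, Val) processing
--     for i, d in enumerate(in_domain_ls):
--         s, len_v = slot_lenval_ls[i]
--         slotval_ls += turn_belief_dict["{}-{}".format(d, s)].split()
--         for l in range(len_v):
--             in_domainslot_ls.append((d, s))
--     assert len(in_domain_ls) == len(slot_lenval_ls)
--     assert len(in_domainslot_ls) == len(slotval_ls)
--     return domain_numslots_ls, in_domain_ls, slot_lenval_ls, in_domainslot_ls, slotval_ls
-- ===== SOURCE B (Python) =====
-- def process_turn_belief_dict(turn_belief_dict, turn_domain_flow, ordered_slot):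
--     # Flat entry list + per-domain filtering scan: no grouping dicts at all.
--     entries = []
--     for k, v in turn_belief_dict.items():
--         d, s = k.split('-')
--         entries.append((d, s, v.split()))
--     domain_numslots_ls = []
--     in_domain_ls = []
--     slot_lenval_ls = []
--     in_domainslot_ls = []
--     slotval_ls = []
--     for dom in turn_domain_flow:
--         sel = [(s, toks) for d, s, toks in entries if d == dom]
--         if ordered_slot == 'alphabetical':
--             sel.sort(key=lambda t: t[0])
--         domain_numslots_ls.append((dom, len(sel)))
--         for s, toks in sel:
--             in_domain_ls.append(dom)
--             slot_lenval_ls.append((s, len(toks)))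
--             in_domainslot_ls += [(dom, s)] * len(toks)
--             slotval_ls += toks
--     return domain_numslots_ls, in_domain_ls, slot_lenval_ls, in_domainslot_ls, slotval_ls
-- ===== Notes on version B (the rewrite author's own statement) =====
-- stated objective: alternative
-- what changed: B keeps no grouping or count dicts at all: it builds one flat (domain, slot, tokens) entry list, then for each domain in turn_domain_flow filters that list, optionally sorts the selection, and emits all five outputs in that single flow-driven loop, whereas A builds two dicts keyed by domain, a separate count pass, positional range-indexing into the dict, and a second enumerate pass that re-splits the values.
import Mathlib
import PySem

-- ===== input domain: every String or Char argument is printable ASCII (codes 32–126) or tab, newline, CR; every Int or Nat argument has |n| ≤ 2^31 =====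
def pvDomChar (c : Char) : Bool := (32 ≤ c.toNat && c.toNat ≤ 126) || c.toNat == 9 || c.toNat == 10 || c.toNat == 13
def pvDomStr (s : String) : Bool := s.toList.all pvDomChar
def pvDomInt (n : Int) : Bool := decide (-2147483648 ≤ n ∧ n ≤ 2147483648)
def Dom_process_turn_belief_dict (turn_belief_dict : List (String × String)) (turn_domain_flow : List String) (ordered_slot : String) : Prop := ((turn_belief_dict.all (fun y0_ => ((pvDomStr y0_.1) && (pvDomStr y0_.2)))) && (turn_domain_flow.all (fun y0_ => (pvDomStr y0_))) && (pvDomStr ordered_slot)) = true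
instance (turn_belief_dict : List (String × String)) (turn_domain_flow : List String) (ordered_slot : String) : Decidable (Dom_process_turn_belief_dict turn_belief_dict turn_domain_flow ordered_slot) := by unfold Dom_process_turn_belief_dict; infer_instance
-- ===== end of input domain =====

-- ===== PORT A =====
-- B replaces A's two domain-keyed dicts, count pass, positional indexing and second
-- value-splitting pass by one flat entry list filtered per domain in a single flow-driven
-- loop; objective: alternative (same asymptotic cost, no speed claim).
-- Shared input adapter: the Python argument is a dict; build it Python-style (insertion order, overwrite in place).
def pvMkDict (tbd : List (String × String)) : PySem.Dict String String :=
  tbd.foldl (fun d p => d.insert p.1 p.2) PySem.Dict.empty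

-- body of A's first loop (split the key, count per domain, record (slot, len(v.split())))
def pvStepA (st : PySem.Dict String Int × PySem.Dict String (List (String × Int))) (kv : String × String) :
    PySem.Dict String Int × PySem.Dict String (List (String × Int)) :=
  let parts := (PySem.Str.split? kv.1 "-").getD []
  let d := parts.getD 0 ""
  let s := parts.getD 1 ""
  ((if st.1.contains d then st.1 else st.1.insert d 0).modify d 0 (· + 1),
   (if st.2.contains d then st.2 else st.2.insert d []).modify d []
     (· ++ [(s, ((PySem.Str.split₀ kv.2).length : Int))]))


def process_turn_belief_dict (turn_belief_dict : List (String × String)) (turn_domain_flow : List String) (ordered_slot : String) : (List (String × Int)) × List String × (List (String × Int)) × (List (String × String)) × List String :=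
  let dict := pvMkDict turn_belief_dict
  let st1 := dict.items.foldl pvStepA (PySem.Dict.empty, PySem.Dict.empty)
  let domain_numslots_ls := turn_domain_flow.foldl (fun acc d =>
      if st1.1.contains d then acc ++ [(d, st1.1.getD d 0)] else acc ++ [(d, (0 : Int))]) []
  let dl2 := if ordered_slot = "alphabetical" then
      st1.2.items.foldl (fun dd kv => dd.insert kv.1 (PySem.List.sorted kv.2 (fun t => t.1))) st1.2
    else st1.2
  let st2 := domain_numslots_ls.foldl (fun (st : (List (String × Int)) × List String) dn =>
      (PySem.List.pyRange 0 dn.2 1).foldl (fun st _n =>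
        (st.1 ++ [PySem.List.pyGetD (dl2.getD dn.1 []) _n ("", 0)], st.2 ++ [dn.1])) st) ([], [])
  let st3 := (PySem.List.enumerate st2.2 0).foldl (fun (st : List String × List (String × String)) idp =>
      let sl := PySem.List.pyGetD st2.1 idp.1 ("", 0)
      (st.1 ++ PySem.Str.split₀ (dict.getD (PySem.Str.join "-" [idp.2, sl.1]) ""),
       (PySem.List.pyRange 0 sl.2 1).foldl (fun l _l => l ++ [(idp.2, sl.1)]) st.2)) ([], [])
  (domain_numslots_ls, st2.2, st2.1, st3.2, st3.1)

-- ===== PORT B =====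
-- one flat entry of B's first loop: (domain, slot, token list), the value split once
def pvEntry (kv : String × String) : String × String × List String :=
  let parts := (PySem.Str.split? kv.1 "-").getD []
  (parts.getD 0 "", parts.getD 1 "", PySem.Str.split₀ kv.2)


def process_turn_belief_dict_alt (turn_belief_dict : List (String × String)) (turn_domain_flow : List String) (ordered_slot : String) : (List (String × Int)) × List String × (List (String × Int)) × (List (String × String)) × List String :=
  let dict := pvMkDict turn_belief_dict
  let entries := dict.items.foldl (fun acc kv => acc ++ [pvEntry kv]) []
  turn_domain_flow.foldl
    (fun (st : (List (String × Int)) × List String × (List (String × Int)) × (List (String × String)) × List String) dom =>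
      let sel0 := (entries.filter (fun e => e.1 == dom)).map (fun e => e.2)
      let sel := if ordered_slot = "alphabetical" then
          PySem.List.sorted sel0 (fun t : String × List String => t.1) else sel0
      sel.foldl (fun st p =>
          (st.1, st.2.1 ++ [dom], st.2.2.1 ++ [(p.1, (p.2.length : Int))],
           st.2.2.2.1 ++ List.replicate p.2.length (dom, p.1), st.2.2.2.2 ++ p.2))
        (st.1 ++ [(dom, (sel.length : Int))], st.2))
    ([], [], [], [], [])

-- ===== PRECONDITION & SPEC =====
-- Pre_ excludes exactly the inputs on which A raises: a key without exactly one '-' makes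
-- `d, s = k.split('-')` raise ValueError in Python.
def Pre_process_turn_belief_dict (turn_belief_dict : List (String × String)) (turn_domain_flow : List String) (ordered_slot : String) : Prop :=
  ∀ p ∈ turn_belief_dict, ((PySem.Str.split? p.1 "-").getD []).length = 2
instance (turn_belief_dict : List (String × String)) (turn_domain_flow : List String) (ordered_slot : String) : Decidable (Pre_process_turn_belief_dict turn_belief_dict turn_domain_flow ordered_slot) := by unfold Pre_process_turn_belief_dict; infer_instance

def pvWitness_process_turn_belief_dict : (List (String × String)) × List String × String :=
  ([("hotel-area", "east side"), ("hotel-stars", "4"), ("train-day", "monday")], ["hotel", "train", "police"], "alphabetical")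

def Spec_process_turn_belief_dict (turn_belief_dict : List (String × String)) (turn_domain_flow : List String) (ordered_slot : String) (out : (List (String × Int)) × List String × (List (String × Int)) × (List (String × String)) × List String) : Prop := out = process_turn_belief_dict_alt turn_belief_dict turn_domain_flow ordered_slot
instance (turn_belief_dict : List (String × String)) (turn_domain_flow : List String) (ordered_slot : String) (out : (List (String × Int)) × List String × (List (String × Int)) × (List (String × String)) × List String) : Decidable (Spec_process_turn_belief_dict turn_belief_dict turn_domain_flow ordered_slot out) := by unfold Spec_process_turn_belief_dict; infer_instance

-- ===== CLAIM (what is proved, stated in full; the proofs are below) =====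
def Claim_equal_process_turn_belief_dict : Prop := ∀ (turn_belief_dict : List (String × String)) (turn_domain_flow : List String) (ordered_slot : String), Dom_process_turn_belief_dict turn_belief_dict turn_domain_flow ordered_slot → Pre_process_turn_belief_dict turn_belief_dict turn_domain_flow ordered_slot → Spec_process_turn_belief_dict turn_belief_dict turn_domain_flow ordered_slot (process_turn_belief_dict turn_belief_dict turn_domain_flow ordered_slot)

-- ===== LEMMAS AND PROOFS =====
-- proof-only ghost grouping step (domain -> list of (slot, tokens)); used to relate both ports
def pvStepB (g : PySem.Dict String (List (String × List String))) (kv : String × String) :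
    PySem.Dict String (List (String × List String)) :=
  let parts := (PySem.Str.split? kv.1 "-").getD []
  (g.setdefault (parts.getD 0 "") []).modify (parts.getD 0 "") []
    (· ++ [(parts.getD 1 "", PySem.Str.split₀ kv.2)])

theorem pv_inter_cons₂ (c : Char) (z w : List Char) (u : List (List Char)) :
    [c].intercalate (z :: w :: u) = z ++ c :: [c].intercalate (w :: u) := by
  simp [List.intercalate]

theorem pv_inter_snoc_char (c a : Char) : ∀ (xs : List (List Char)) (y : List Char),
    [c].intercalate (xs ++ [y ++ [a]]) = [c].intercalate (xs ++ [y]) ++ [a] := by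
  intro xs
  induction xs with
  | nil => intro y; simp [List.intercalate]
  | cons z t ih =>
    intro y
    cases t with
    | nil =>
      simp [List.intercalate]
    | cons w u =>
      simp only [List.cons_append, pv_inter_cons₂]
      have h := ih y
      simp only [List.cons_append] at h
      rw [h]
      simp [List.append_assoc]

theorem pv_inter_snoc_nil (c : Char) : ∀ (xs : List (List Char)) (_ : xs ≠ []),
    [c].intercalate (xs ++ [([] : List Char)]) = [c].intercalate xs ++ [c] := by
  intro xs
  induction xs with
  | nil => intro h; exact absurd rfl h
  | cons z t ih =>
    intro _
    cases t with
    | nil => simp [List.intercalate]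
    | cons w u =>
      simp only [List.cons_append, pv_inter_cons₂]
      have h := ih (by simp)
      simp only [List.cons_append] at h
      rw [h]
      simp [List.append_assoc]

theorem pv_go_join : ∀ (fuel : Nat) (l cur : List Char) (acc : List (List Char)),
    l.length < fuel →
    ['-'].intercalate (PySem.Chars.splitOn.go ['-'] fuel l cur acc) =
      ['-'].intercalate ((cur.reverse :: acc).reverse) ++ l := by
  intro fuel
  induction fuel with
  | zero => intro l cur acc h; omega
  | succ n ih =>
    intro l cur acc h
    cases l with
    | nil => simp [PySem.Chars.splitOn.go]
    | cons c rest =>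
      by_cases hc : c = '-'
      · subst hc
        rw [show PySem.Chars.splitOn.go ['-'] (n+1) ('-' :: rest) cur acc
              = PySem.Chars.splitOn.go ['-'] n (List.drop 1 ('-' :: rest)) [] (cur.reverse :: acc) from by
            simp [PySem.Chars.splitOn.go, List.isPrefixOf]]
        simp only [List.drop_succ_cons, List.drop_zero]
        rw [ih rest [] (cur.reverse :: acc) (by simpa using h)]
        simp only [List.reverse_nil, List.reverse_cons]
        rw [pv_inter_snoc_nil '-' (acc.reverse ++ [cur.reverse]) (by simp)]
        simp
      · rw [show PySem.Chars.splitOn.go ['-'] (n+1) (c :: rest) cur acc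
              = PySem.Chars.splitOn.go ['-'] n rest (c :: cur) acc from by
            simp only [PySem.Chars.splitOn.go, List.isPrefixOf]
            rw [if_neg (by simp [Ne.symm hc])]]
        rw [ih rest (c :: cur) acc (by simpa using h)]
        simp only [List.reverse_cons]
        rw [show acc.reverse ++ [cur.reverse ++ [c]] = acc.reverse ++ [cur.reverse ++ [c]] from rfl]
        rw [pv_inter_snoc_char '-' c acc.reverse cur.reverse]
        simp

theorem pv_splitOn_join (k : List Char) :
    ['-'].intercalate (PySem.Chars.splitOn k ['-']) = k := by
  rw [PySem.Chars.splitOn]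
  rw [pv_go_join (k.length + 1) k [] [] (by omega)]
  simp [List.intercalate]

theorem pv_key_roundtrip (k d s : String)
    (h : (PySem.Str.split? k "-").getD [] = [d, s]) :
    PySem.Str.join "-" [d, s] = k := by
  have hsep : ("-" : String).toList = ['-'] := by decide
  rw [PySem.Str.split?, PySem.Chars.split?, hsep] at h
  simp only [List.isEmpty_cons, Bool.false_eq_true, if_false, Option.map_some, Option.getD_some] at h
  have hsp : PySem.Chars.splitOn k.toList ['-'] = [d.toList, s.toList] := by
    cases hs1 : PySem.Chars.splitOn k.toList ['-'] with
    | nil => rw [hs1] at h; simp at h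
    | cons a b =>
      rw [hs1] at h
      cases b with
      | nil => simp at h
      | cons a2 b2 =>
        cases b2 with
        | nil =>
          simp only [List.map_cons, List.map_nil, List.cons.injEq, and_true] at h
          rw [← h.1, ← h.2, String.toList_ofList, String.toList_ofList]
        | cons a3 b3 => simp at h
  have := pv_splitOn_join k.toList
  rw [hsp] at this
  rw [PySem.Str.join, hsep, PySem.Chars.join]
  rw [show List.map String.toList [d, s] = [d.toList, s.toList] from rfl, this, String.ofList_toList]

theorem pv_foldl_pair {α β γ : Type} (u : α → List β) (v : α → List γ) :
    ∀ (l : List α) (a : List β) (b : List γ),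
      l.foldl (fun st x => (st.1 ++ u x, st.2 ++ v x)) (a, b) = (a ++ l.flatMap u, b ++ l.flatMap v) := by
  intro l
  induction l with
  | nil => intro a b; simp
  | cons x t ih => intro a b; simp only [List.foldl_cons, ih, List.flatMap_cons, List.append_assoc]

theorem pv_foldl_quint {α β γ δ ε ζ : Type}
    (u1 : α → List β) (u2 : α → List γ) (u3 : α → List δ) (u4 : α → List ε) (u5 : α → List ζ) :
    ∀ (l : List α) (a : List β) (b : List γ) (c : List δ) (d : List ε) (e : List ζ),
      l.foldl (fun st x => (st.1 ++ u1 x, st.2.1 ++ u2 x, st.2.2.1 ++ u3 x, st.2.2.2.1 ++ u4 x, st.2.2.2.2 ++ u5 x)) (a, b, c, d, e)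
        = (a ++ l.flatMap u1, b ++ l.flatMap u2, c ++ l.flatMap u3, d ++ l.flatMap u4, e ++ l.flatMap u5) := by
  intro l
  induction l with
  | nil => intro a b c d e; simp
  | cons x t ih => intro a b c d e; simp only [List.foldl_cons, ih, List.flatMap_cons, List.append_assoc]

theorem pv_foldl_quint_inner {α β γ δ ε ζ : Type}
    (u2 : α → List γ) (u3 : α → List δ) (u4 : α → List ε) (u5 : α → List ζ) :
    ∀ (l : List α) (a : List β) (b : List γ) (c : List δ) (d : List ε) (e : List ζ),
      l.foldl (fun (st : List β × List γ × List δ × List ε × List ζ) x =>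
          (st.1, st.2.1 ++ u2 x, st.2.2.1 ++ u3 x, st.2.2.2.1 ++ u4 x, st.2.2.2.2 ++ u5 x)) (a, b, c, d, e)
        = (a, b ++ l.flatMap u2, c ++ l.flatMap u3, d ++ l.flatMap u4, e ++ l.flatMap u5) := by
  intro l
  induction l with
  | nil => intro a b c d e; simp
  | cons x t ih => intro a b c d e; simp only [List.foldl_cons, ih, List.flatMap_cons, List.append_assoc]

theorem pv_flatMap_one {α β : Type} (f : α → β) (l : List α) :
    l.flatMap (fun x => [f x]) = l.map f := by
  induction l with
  | nil => rfl
  | cons x t ih => simp [ih]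

theorem pv_foldl_const_append {α β : Type} (c : β) :
    ∀ (l : List α) (a : List β), l.foldl (fun acc _ => acc ++ [c]) a = a ++ List.replicate l.length c := by
  intro l
  induction l with
  | nil => intro a; simp
  | cons x t ih =>
    intro a
    simp only [List.foldl_cons, ih, List.length_cons]
    rw [List.append_assoc, show [c] ++ List.replicate t.length c = List.replicate (t.length+1) c from rfl]

theorem pv_foldl_ite_append {α β : Type} (C : α → Prop) [DecidablePred C] (f g : α → β) :
    ∀ (l : List α) (init : List β),
      l.foldl (fun acc d => if C d then acc ++ [f d] else acc ++ [g d]) init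
        = init ++ l.map (fun d => if C d then f d else g d) := by
  intro l
  induction l with
  | nil => intro init; simp
  | cons x t ih =>
    intro init
    simp only [List.foldl_cons, ih, List.map_cons]
    by_cases h : C x <;> simp [h]

theorem pv_foldl_enum {α β γ : Type} (ys : List β) (dflt : β) (F : γ → α → β → γ) :
    ∀ (xs : List α) (k : Nat) (init : γ), ys.length = k + xs.length →
      (PySem.List.enumerate xs (k : Int)).foldl (fun st p => F st p.2 (PySem.List.pyGetD ys p.1 dflt)) init
        = (xs.zip (ys.drop k)).foldl (fun st q => F st q.1 q.2) init := by
  intro xs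
  induction xs with
  | nil => intro k init h; simp [PySem.List.enumerate_nil]
  | cons x t ih =>
    intro k init h
    have hk : k < ys.length := by simp at h; omega
    rw [PySem.List.enumerate_cons, List.drop_eq_getElem_cons hk]
    simp only [List.foldl_cons, List.zip_cons_cons]
    rw [show ((k : Int) + 1) = ((k + 1 : Nat) : Int) from by push_cast; ring]
    rw [ih (k + 1) _ (by simp at h ⊢; omega)]
    congr 1
    rw [PySem.List.pyGetD_natCast]
    simp [List.getD_eq_getElem?_getD, hk]

theorem pv_get?_foldl_insert_f {α : Type} (f : α → α) :
    ∀ (l : List (String × α)) (acc : PySem.Dict String α) (k : String), (l.map Prod.fst).Nodup →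
      (l.foldl (fun a p => a.insert p.1 (f p.2)) acc).get? k =
        (match l.find? (fun p => p.1 == k) with
         | some p => some (f p.2)
         | none => acc.get? k) := by
  intro l
  induction l with
  | nil => intro acc k _; simp
  | cons p t ih =>
    intro acc k hnd
    simp only [List.map_cons, List.nodup_cons] at hnd
    simp only [List.foldl_cons]
    rw [ih _ k hnd.2]
    by_cases hk : p.1 = k
    · subst hk
      have hfind : t.find? (fun q => q.1 == p.1) = none := by
        rw [List.find?_eq_none]
        intro q hq
        simp only [beq_iff_eq]
        intro hqe
        exact hnd.1 (by rw [← hqe]; exact List.mem_map_of_mem hq)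
      rw [hfind, List.find?_cons_of_pos (by simp)]
      cases hfind2 : t.find? (fun q => q.1 == p.1) with
      | none => simp [PySem.Dict.get?_insert]
      | some q => rw [hfind2] at hfind; cases hfind
    · rw [List.find?_cons_of_neg (by simp [hk])]
      cases hfind2 : t.find? (fun q => q.1 == k) with
      | none => simp [PySem.Dict.get?_insert, Ne.symm hk]
      | some q => rfl

theorem pv_get?_rebuild {α : Type} (f : α → α) (D0 : PySem.Dict String α) (hnd : D0.keys.Nodup) (k : String) :
    (D0.items.foldl (fun a p => a.insert p.1 (f p.2)) D0).get? k = (D0.get? k).map f := by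
  rw [pv_get?_foldl_insert_f f D0.items D0 k (by simpa [PySem.Dict.keys] using hnd)]
  rw [show D0.get? k = ((D0.items.find? (fun p => p.1 == k)).map Prod.snd) from rfl]
  cases D0.items.find? (fun p => p.1 == k) <;> simp

theorem pv_map_insertBy {α β : Type} (F : α → β) (bf : α → α → Bool) (bf' : β → β → Bool)
    (hb : ∀ a b, bf' (F a) (F b) = bf a b) (x : α) :
    ∀ (ys : List α), (PySem.List.insertBy bf x ys).map F = PySem.List.insertBy bf' (F x) (ys.map F) := by
  intro ys
  induction ys with
  | nil => simp [PySem.List.insertBy]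
  | cons y t ih =>
    simp only [List.map_cons, PySem.List.insertBy, hb]
    by_cases h : bf x y
    · simp [h]
    · simp only [h, Bool.false_eq_true, if_false, List.map_cons, ih]

theorem pv_sorted_map_aux {α β κ : Type} [LinearOrder κ] (F : α → β) (keyA : α → κ) (keyB : β → κ)
    (hk : ∀ a, keyB (F a) = keyA a) :
    ∀ (xs : List α) (acc : List α),
      (xs.foldl (fun a x => PySem.List.insertBy (fun p q => decide (keyA p < keyA q)) x a) acc).map F
        = (xs.map F).foldl (fun a y => PySem.List.insertBy (fun p q => decide (keyB p < keyB q)) y a) (acc.map F) := by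
  intro xs
  induction xs with
  | nil => intro acc; rfl
  | cons x t ih =>
    intro acc
    simp only [List.map_cons, List.foldl_cons]
    rw [ih]
    congr 1
    rw [pv_map_insertBy F (fun p q => decide (keyA p < keyA q)) (fun p q => decide (keyB p < keyB q)) (by intro a b; show decide (keyB (F a) < keyB (F b)) = decide (keyA a < keyA b); rw [hk, hk]) x acc]

theorem pv_sorted_map {α β κ : Type} [LinearOrder κ] (F : α → β) (keyA : α → κ) (keyB : β → κ)
    (hk : ∀ a, keyB (F a) = keyA a) (xs : List α) :
    PySem.List.sorted (xs.map F) keyB = (PySem.List.sorted xs keyA).map F := by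
  rw [PySem.List.sorted_eq_foldl_insertBy, PySem.List.sorted_eq_foldl_insertBy]
  rw [pv_sorted_map_aux F keyA keyB hk xs []]
  rfl

theorem pv_if_insert_eq_setdefault {α : Type} (g : PySem.Dict String α) (k : String) (v : α) :
    (if g.contains k then g else g.insert k v) = g.setdefault k v := by
  by_cases h : g.contains k
  · rw [if_pos h, PySem.Dict.setdefault, if_pos h]
  · rw [if_neg h, PySem.Dict.setdefault, if_neg h]
    apply PySem.Dict.ext
    rw [PySem.Dict.items_insert_of_not_contains _ _ (by simpa using h)]

theorem pv_step_contains {α : Type} (g : PySem.Dict String α) (k k' : String) (v0 : α) (f : α → α) :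
    ((g.setdefault k v0).modify k v0 f).contains k' = (k' == k || g.contains k') := by
  rw [PySem.Dict.contains_modify, PySem.Dict.contains_setdefault]
  by_cases h : k' = k <;> simp [h]

theorem pv_step_getD_self {α : Type} (g : PySem.Dict String α) (k : String) (v0 : α) (f : α → α) :
    ((g.setdefault k v0).modify k v0 f).getD k v0 = f (g.getD k v0) := by
  rw [PySem.Dict.getD_modify, if_pos rfl, PySem.Dict.getD_setdefault_self]

theorem pv_step_getD_ne {α : Type} (g : PySem.Dict String α) (k k' : String) (v0 : α) (f : α → α)
    (h : k' ≠ k) : ((g.setdefault k v0).modify k v0 f).getD k' v0 = g.getD k' v0 := by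
  rw [PySem.Dict.getD_modify, if_neg h, PySem.Dict.getD_eq_get?_getD,
    PySem.Dict.get?_setdefault_of_ne _ _ h, ← PySem.Dict.getD_eq_get?_getD]

theorem pv_step_nodup {α : Type} (g : PySem.Dict String α) (k : String) (v0 : α) (f : α → α)
    (h : g.keys.Nodup) : ((g.setdefault k v0).modify k v0 f).keys.Nodup := by
  have hsd : (g.setdefault k v0).keys.Nodup ∧ (g.setdefault k v0).contains k = true := by
    rw [PySem.Dict.setdefault]
    by_cases hc : g.contains k
    · rw [if_pos hc]; exact ⟨h, hc⟩
    · rw [if_neg hc]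
      constructor
      · rw [PySem.Dict.keys_mk]
        simp only [List.map_append]
        rw [List.nodup_append]
        refine ⟨by simpa [PySem.Dict.keys] using h, by simp, ?_⟩
        intro a ha b hb
        have hb' : b = k := by simpa using hb
        subst hb'
        intro he
        subst he
        exact absurd ((PySem.Dict.contains_iff_mem_keys g a).2 (by simpa [PySem.Dict.keys] using ha)) (by simpa using hc)
      · rw [show PySem.Dict.contains ⟨g.items ++ [(k, v0)]⟩ k = decide (k ∈ PySem.Dict.keys ⟨g.items ++ [(k, v0)]⟩) from PySem.Dict.contains_eq_decide_mem_keys _ _]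
        simp [PySem.Dict.keys_mk]
  rw [show ((g.setdefault k v0).modify k v0 f).keys = ((g.setdefault k v0).insert k (f ((g.setdefault k v0).getD k v0))).keys from PySem.Dict.keys_modify _ _ _ _]
  rw [PySem.Dict.keys_insert_of_contains _ _ hsd.2]
  exact hsd.1

theorem pv_len2 (l : List String) (h : l.length = 2) : l = [l.getD 0 "", l.getD 1 ""] := by
  match l, h with
  | [a, b], _ => rfl

theorem pv_loop1 (D : PySem.Dict String String) (hnodup : D.keys.Nodup)
    (hp2 : ∀ p ∈ D.items, ((PySem.Str.split? p.1 "-").getD []).length = 2) :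
    ∀ (L : List (String × String)), (∀ p ∈ L, p ∈ D.items) →
    ∀ (dn : PySem.Dict String Int) (dl : PySem.Dict String (List (String × Int)))
      (g : PySem.Dict String (List (String × List String))),
      (∀ d, dn.contains d = g.contains d) →
      (∀ d, dl.contains d = g.contains d) →
      (∀ d, dn.getD d 0 = ((g.getD d []).length : Int)) →
      (∀ d, dl.getD d [] = (g.getD d []).map (fun p => (p.1, (p.2.length : Int)))) →
      (∀ d q, q ∈ g.getD d [] → PySem.Str.split₀ (D.getD (PySem.Str.join "-" [d, q.1]) "") = q.2) →
      dl.keys.Nodup → g.keys.Nodup →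
      (∀ d, (L.foldl pvStepA (dn, dl)).1.contains d = (L.foldl pvStepB g).contains d) ∧
      (∀ d, (L.foldl pvStepA (dn, dl)).2.contains d = (L.foldl pvStepB g).contains d) ∧
      (∀ d, (L.foldl pvStepA (dn, dl)).1.getD d 0 = (((L.foldl pvStepB g).getD d []).length : Int)) ∧
      (∀ d, (L.foldl pvStepA (dn, dl)).2.getD d [] = ((L.foldl pvStepB g).getD d []).map (fun p => (p.1, (p.2.length : Int)))) ∧
      (∀ d q, q ∈ (L.foldl pvStepB g).getD d [] → PySem.Str.split₀ (D.getD (PySem.Str.join "-" [d, q.1]) "") = q.2) ∧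
      (L.foldl pvStepA (dn, dl)).2.keys.Nodup ∧
      (L.foldl pvStepB g).keys.Nodup := by
  intro L
  induction L with
  | nil =>
    intro _ dn dl g h1 h2 h3 h4 h5 h6 h7
    exact ⟨h1, h2, h3, h4, h5, h6, h7⟩
  | cons kv t ih =>
    intro hmem dn dl g h1 h2 h3 h4 h5 h6 h7
    have hkv : kv ∈ D.items := hmem kv (by simp)
    set parts := (PySem.Str.split? kv.1 "-").getD [] with hparts
    set d0 := parts.getD 0 "" with hd0
    set s0 := parts.getD 1 "" with hs0
    have hkey : PySem.Str.join "-" [d0, s0] = kv.1 :=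
      pv_key_roundtrip kv.1 d0 s0 (by rw [← hparts]; exact pv_len2 parts (hp2 kv hkv))
    have hval : D.getD kv.1 "" = kv.2 :=
      PySem.Dict.getD_of_get?_eq_some D "" (PySem.Dict.get?_of_mem_items D hkv hnodup)
    have hstepA : pvStepA (dn, dl) kv =
        ((dn.setdefault d0 0).modify d0 0 (· + 1),
         (dl.setdefault d0 []).modify d0 [] (· ++ [(s0, ((PySem.Str.split₀ kv.2).length : Int))])) := by
      rw [pvStepA]
      rw [pv_if_insert_eq_setdefault, pv_if_insert_eq_setdefault]
    have hstepB : pvStepB g kv =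
        (g.setdefault d0 []).modify d0 [] (· ++ [(s0, PySem.Str.split₀ kv.2)]) := rfl
    simp only [List.foldl_cons, hstepA, hstepB]
    apply ih (fun p hp => hmem p (by simp [hp]))
    · intro d
      rw [pv_step_contains, pv_step_contains, h1]
    · intro d
      rw [pv_step_contains, pv_step_contains, h2]
    · intro d
      by_cases hd : d = d0
      · subst hd
        rw [pv_step_getD_self, pv_step_getD_self, h3]
        simp
      · rw [pv_step_getD_ne _ _ _ _ _ hd, pv_step_getD_ne _ _ _ _ _ hd, h3]
    · intro d
      by_cases hd : d = d0
      · subst hd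
        rw [pv_step_getD_self, pv_step_getD_self, h4]
        simp
      · rw [pv_step_getD_ne _ _ _ _ _ hd, pv_step_getD_ne _ _ _ _ _ hd, h4]
    · intro d q hq
      by_cases hd : d = d0
      · subst hd
        rw [pv_step_getD_self] at hq
        rcases List.mem_append.1 hq with hq | hq
        · exact h5 _ q hq
        · simp only [List.mem_singleton] at hq
          subst hq
          rw [hkey, hval]
      · rw [pv_step_getD_ne _ _ _ _ _ hd] at hq
        exact h5 _ q hq
    · exact pv_step_nodup _ _ _ _ h6
    · exact pv_step_nodup _ _ _ _ h7

-- ghost grouped dict described by a filter over the raw items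
theorem pv_gB_filter :
    ∀ (L : List (String × String)) (g : PySem.Dict String (List (String × List String))) (dom : String),
      (L.foldl pvStepB g).getD dom []
        = g.getD dom [] ++ (L.filter (fun kv => (pvEntry kv).1 == dom)).map (fun kv => (pvEntry kv).2) := by
  intro L
  induction L with
  | nil => intro g dom; simp
  | cons kv t ih =>
    intro g dom
    simp only [List.foldl_cons, List.filter_cons]
    rw [ih]
    by_cases hd : (pvEntry kv).1 = dom
    · rw [if_pos (by simpa using hd)]
      rw [show pvStepB g kv = (g.setdefault (pvEntry kv).1 []).modify (pvEntry kv).1 []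
            (· ++ [(pvEntry kv).2]) from rfl]
      rw [hd, pv_step_getD_self]
      simp
    · rw [if_neg (by simpa using hd)]
      rw [show pvStepB g kv = (g.setdefault (pvEntry kv).1 []).modify (pvEntry kv).1 []
            (· ++ [(pvEntry kv).2]) from rfl]
      rw [pv_step_getD_ne _ _ _ _ _ (Ne.symm hd)]

theorem pv_foldl_snoc_eq_map {α β : Type} (f : α → β) :
    ∀ (l : List α) (acc : List β), l.foldl (fun acc x => acc ++ [f x]) acc = acc ++ l.map f := by
  intro l
  induction l with
  | nil => intro acc; simp
  | cons x t ih => intro acc; simp [ih]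

def pvDnlsC (sG : String → List (String × List String)) (flow : List String) : List (String × Int) :=
  flow.map (fun d => (d, ((sG d).length : Int)))

def pvLBC (sG : String → List (String × List String)) (flow : List String) :
    List (String × (String × List String)) :=
  flow.flatMap (fun d => (sG d).map (fun p => (d, p)))

theorem pv_mem_LBC (sG : String → List (String × List String)) (flow : List String)
    (q : String × (String × List String)) (hq : q ∈ pvLBC sG flow) : q.2 ∈ sG q.1 := by
  rw [pvLBC, List.mem_flatMap] at hq
  obtain ⟨d, _, hq2⟩ := hq
  rw [List.mem_map] at hq2
  obtain ⟨p, hp, he⟩ := hq2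
  subst he
  exact hp

theorem pv_A_dnls (dnA : PySem.Dict String Int) (sG : String → List (String × List String))
    (flow : List String)
    (hc : ∀ d, dnA.contains d = true → dnA.getD d 0 = ((sG d).length : Int))
    (hc0 : ∀ d, dnA.contains d = false → sG d = []) :
    flow.foldl (fun acc d => if dnA.contains d then acc ++ [(d, dnA.getD d 0)] else acc ++ [(d, (0 : Int))]) []
      = pvDnlsC sG flow := by
  rw [pv_foldl_ite_append (fun d => dnA.contains d = true) _ _ flow []]
  rw [List.nil_append, pvDnlsC]
  apply List.map_congr_left
  intro d _
  by_cases h : dnA.contains d = true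
  · rw [if_pos h, hc d h]
  · rw [if_neg h, hc0 d (by simpa using h)]
    simp

theorem pv_A_st2 (dl2 : PySem.Dict String (List (String × Int)))
    (sG : String → List (String × List String)) (flow : List String)
    (h4 : ∀ d, dl2.getD d [] = (sG d).map (fun p => (p.1, (p.2.length : Int)))) :
    (pvDnlsC sG flow).foldl (fun (st : (List (String × Int)) × List String) dn =>
        (PySem.List.pyRange 0 dn.2 1).foldl (fun st _n =>
          (st.1 ++ [PySem.List.pyGetD (dl2.getD dn.1 []) _n ("", 0)], st.2 ++ [dn.1])) st) ([], [])
      = ((pvLBC sG flow).map (fun q => (q.2.1, (q.2.2.length : Int))), (pvLBC sG flow).map (·.1)) := by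
  have hbody : ∀ (st : (List (String × Int)) × List String), ∀ dn ∈ pvDnlsC sG flow,
      (PySem.List.pyRange 0 dn.2 1).foldl (fun st _n =>
          (st.1 ++ [PySem.List.pyGetD (dl2.getD dn.1 []) _n ("", 0)], st.2 ++ [dn.1])) st
        = (st.1 ++ (sG dn.1).map (fun p => (p.1, (p.2.length : Int))),
           st.2 ++ List.replicate (sG dn.1).length dn.1) := by
    intro st dn hdn
    obtain ⟨d, _, he⟩ := List.mem_map.1 (by rw [pvDnlsC] at hdn; exact hdn)
    subst he
    simp only
    have hlen : ((sG d).length : Int) = ((dl2.getD d []).length : Int) := by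
      rw [h4 d]; simp
    rw [hlen]
    rw [PySem.List.foldl_pyRange_zero_pyGetD' (dl2.getD d []) ("", 0)
      (fun st y => (st.1 ++ [y], st.2 ++ [d])) st]
    rw [pv_foldl_pair (fun y => [y]) (fun _ => [d]) (dl2.getD d []) st.1 st.2]
    rw [h4 d]
    simp only [Prod.mk.injEq]
    constructor
    · rw [pv_flatMap_one (fun (y : String × Int) => y)]
      simp
    · rw [show List.flatMap (fun (_ : String × Int) => [d]) ((sG d).map (fun p => (p.1, (p.2.length : Int)))) =
            List.replicate ((sG d).map (fun p => (p.1, (p.2.length : Int)))).length d from ?_]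
      · simp
      · rw [← List.map_const']
        exact pv_flatMap_one (fun _ => d) _
  rw [PySem.List.foldl_congr_mem _ _ _ _ hbody]
  rw [pv_foldl_pair]
  simp only [List.nil_append]
  simp only [Prod.mk.injEq]
  constructor
  · rw [pvLBC, List.map_flatMap, pvDnlsC, List.flatMap_map]
    apply List.flatMap_congr
    intro d _
    rw [List.map_map]
    rfl
  · rw [pvLBC, List.map_flatMap, pvDnlsC, List.flatMap_map]
    apply List.flatMap_congr
    intro d _
    rw [List.map_map]
    exact (List.map_const' (l := sG d) (b := d)).symm

theorem pv_foldl_enum_zero {α β γ : Type} (ys : List β) (dflt : β) (F : γ → α → β → γ)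
    (xs : List α) (init : γ) (h : ys.length = xs.length) :
    (PySem.List.enumerate xs 0).foldl (fun st p => F st p.2 (PySem.List.pyGetD ys p.1 dflt)) init
      = (xs.zip ys).foldl (fun st q => F st q.1 q.2) init := by
  have := pv_foldl_enum ys dflt F xs 0 init (by omega)
  simpa using this

theorem pv_A_st3 (D : PySem.Dict String String) (sG : String → List (String × List String))
    (flow : List String)
    (h5 : ∀ d q, q ∈ sG d → PySem.Str.split₀ (D.getD (PySem.Str.join "-" [d, q.1]) "") = q.2) :
    (PySem.List.enumerate ((pvLBC sG flow).map (·.1)) 0).foldl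
        (fun (st : List String × List (String × String)) idp =>
          (st.1 ++ PySem.Str.split₀ (D.getD (PySem.Str.join "-" [idp.2,
              (PySem.List.pyGetD ((pvLBC sG flow).map (fun q => (q.2.1, (q.2.2.length : Int)))) idp.1 ("", 0)).1]) ""),
           (PySem.List.pyRange 0
              (PySem.List.pyGetD ((pvLBC sG flow).map (fun q => (q.2.1, (q.2.2.length : Int)))) idp.1 ("", 0)).2 1).foldl
             (fun l _l => l ++ [(idp.2,
              (PySem.List.pyGetD ((pvLBC sG flow).map (fun q => (q.2.1, (q.2.2.length : Int)))) idp.1 ("", 0)).1)]) st.2))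
        ([], [])
      = ((pvLBC sG flow).flatMap (fun q => q.2.2),
         (pvLBC sG flow).flatMap (fun q => List.replicate q.2.2.length (q.1, q.2.1))) := by
  rw [pv_foldl_enum_zero ((pvLBC sG flow).map (fun q => (q.2.1, (q.2.2.length : Int)))) ("", 0)
      (fun st a b => (st.1 ++ PySem.Str.split₀ (D.getD (PySem.Str.join "-" [a, b.1]) ""),
        (PySem.List.pyRange 0 b.2 1).foldl (fun l _l => l ++ [(a, b.1)]) st.2))
      ((pvLBC sG flow).map (·.1)) ([], []) (by simp)]
  rw [List.zip_map']
  rw [List.foldl_map]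
  have hbody : ∀ (st : List String × List (String × String)), ∀ q ∈ pvLBC sG flow,
      (st.1 ++ PySem.Str.split₀ (D.getD (PySem.Str.join "-" [q.1, q.2.1]) ""),
       (PySem.List.pyRange 0 (q.2.2.length : Int) 1).foldl (fun l _l => l ++ [(q.1, q.2.1)]) st.2)
        = (st.1 ++ q.2.2, st.2 ++ List.replicate q.2.2.length (q.1, q.2.1)) := by
    intro st q hq
    rw [h5 q.1 q.2 (pv_mem_LBC sG flow q hq)]
    rw [pv_foldl_const_append]
    rw [show (PySem.List.pyRange 0 (q.2.2.length : Int) 1).length = q.2.2.length from by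
      rw [PySem.List.length_pyRange_one]; omega]
  rw [PySem.List.foldl_congr_mem _ _
      (fun (st : List String × List (String × String)) q => (st.1 ++ q.2.2, st.2 ++ List.replicate q.2.2.length (q.1, q.2.1)))
      _ (fun st q hq => hbody st q hq)]
  rw [pv_foldl_pair (fun (q : String × (String × List String)) => q.2.2)
      (fun (q : String × (String × List String)) => List.replicate q.2.2.length (q.1, q.2.1)) (pvLBC sG flow) [] []]
  simp

-- B's flow loop, with each selection rewritten to the grouped value sG dom, flattened to flatMaps
theorem pv_B_out (sG : String → List (String × List String)) (flow : List String) :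
    flow.foldl
      (fun (st : (List (String × Int)) × List String × (List (String × Int)) × (List (String × String)) × List String) dom =>
        (sG dom).foldl (fun st p =>
            (st.1, st.2.1 ++ [dom], st.2.2.1 ++ [(p.1, (p.2.length : Int))],
             st.2.2.2.1 ++ List.replicate p.2.length (dom, p.1), st.2.2.2.2 ++ p.2))
          (st.1 ++ [(dom, ((sG dom).length : Int))], st.2))
      ([], [], [], [], [])
    = (flow.map (fun d => (d, ((sG d).length : Int))),
       flow.flatMap (fun d => List.replicate (sG d).length d),
       flow.flatMap (fun d => (sG d).map (fun p => (p.1, (p.2.length : Int)))),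
       flow.flatMap (fun d => (sG d).flatMap (fun p => List.replicate p.2.length (d, p.1))),
       flow.flatMap (fun d => (sG d).flatMap (fun p => p.2))) := by
  have hbody : ∀ (st : (List (String × Int)) × List String × (List (String × Int)) × (List (String × String)) × List String),
      ∀ dom ∈ flow,
      (sG dom).foldl (fun st p =>
            (st.1, st.2.1 ++ [dom], st.2.2.1 ++ [(p.1, (p.2.length : Int))],
             st.2.2.2.1 ++ List.replicate p.2.length (dom, p.1), st.2.2.2.2 ++ p.2))
          (st.1 ++ [(dom, ((sG dom).length : Int))], st.2)
        = (st.1 ++ [(dom, ((sG dom).length : Int))],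
           st.2.1 ++ List.replicate (sG dom).length dom,
           st.2.2.1 ++ (sG dom).map (fun p => (p.1, (p.2.length : Int))),
           st.2.2.2.1 ++ (sG dom).flatMap (fun p => List.replicate p.2.length (dom, p.1)),
           st.2.2.2.2 ++ (sG dom).flatMap (fun p => p.2)) := by
    intro st dom _
    rw [show (st.1 ++ [(dom, ((sG dom).length : Int))], st.2)
          = (st.1 ++ [(dom, ((sG dom).length : Int))], st.2.1, st.2.2.1, st.2.2.2.1, st.2.2.2.2) from rfl]
    rw [pv_foldl_quint_inner (fun (_ : String × List String) => [dom])
        (fun p => [(p.1, (p.2.length : Int))]) (fun p => List.replicate p.2.length (dom, p.1))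
        (fun p => p.2) (sG dom)]
    rw [pv_flatMap_one (fun (_ : String × List String) => dom), List.map_const',
      pv_flatMap_one (fun (p : String × List String) => (p.1, (p.2.length : Int)))]
  rw [PySem.List.foldl_congr_mem _ _ _ _ hbody]
  rw [pv_foldl_quint (fun d => [(d, ((sG d).length : Int))])
      (fun d => List.replicate (sG d).length d)
      (fun d => (sG d).map (fun p => (p.1, (p.2.length : Int))))
      (fun d => (sG d).flatMap (fun p => List.replicate p.2.length (d, p.1)))
      (fun d => (sG d).flatMap (fun p => p.2)) flow [] [] [] [] []]
  rw [pv_flatMap_one (fun d => (d, ((sG d).length : Int)))]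
  simp

theorem pv_LBC_map {β : Type} (sG : String → List (String × List String)) (flow : List String)
    (F : String × (String × List String) → β) :
    (pvLBC sG flow).map F = flow.flatMap (fun d => (sG d).map (fun p => F (d, p))) := by
  rw [pvLBC, List.map_flatMap]
  apply List.flatMap_congr
  intro d _
  rw [List.map_map]
  rfl

theorem pv_LBC_flatMap {β : Type} (sG : String → List (String × List String)) (flow : List String)
    (F : String × (String × List String) → List β) :
    (pvLBC sG flow).flatMap F = flow.flatMap (fun d => (sG d).flatMap (fun p => F (d, p))) := by
  rw [pvLBC]
  induction flow with
  | nil => rfl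
  | cons d t ih =>
    simp only [List.flatMap_cons, List.flatMap_append, ih, List.flatMap_map]

theorem pv_final (sG : String → List (String × List String)) (flow : List String) :
    (pvDnlsC sG flow,
     (pvLBC sG flow).map (·.1),
     (pvLBC sG flow).map (fun q => (q.2.1, (q.2.2.length : Int))),
     (pvLBC sG flow).flatMap (fun q => List.replicate q.2.2.length (q.1, q.2.1)),
     (pvLBC sG flow).flatMap (fun q => q.2.2))
    = flow.foldl
        (fun (st : (List (String × Int)) × List String × (List (String × Int)) × (List (String × String)) × List String) dom =>
          (sG dom).foldl (fun st p =>
              (st.1, st.2.1 ++ [dom], st.2.2.1 ++ [(p.1, (p.2.length : Int))],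
               st.2.2.2.1 ++ List.replicate p.2.length (dom, p.1), st.2.2.2.2 ++ p.2))
            (st.1 ++ [(dom, ((sG dom).length : Int))], st.2))
        ([], [], [], [], []) := by
  rw [pv_B_out sG flow]
  simp only [Prod.mk.injEq]
  refine ⟨rfl, ?_, ?_, ?_, ?_⟩
  · rw [pv_LBC_map]
    apply List.flatMap_congr
    intro d _
    exact List.map_const' (l := sG d) (b := d)
  · rw [pv_LBC_map]
  · rw [pv_LBC_flatMap]
  · rw [pv_LBC_flatMap]

theorem pv_mkdict_keyprop (P : String → Prop) : ∀ (l : List (String × String)) (acc : PySem.Dict String String),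
    (∀ p ∈ acc.items, P p.1) → (∀ q ∈ l, P q.1) →
    ∀ p ∈ (l.foldl (fun d q => d.insert q.1 q.2) acc).items, P p.1 := by
  intro l
  induction l with
  | nil => intro acc ha _ p hp; exact ha p hp
  | cons q t ih =>
    intro acc ha hl p hp
    refine ih (acc.insert q.1 q.2) ?_ (fun r hr => hl r (by simp [hr])) p hp
    intro r hr
    rcases (PySem.Dict.mem_items_insert _ _ _ _).1 hr with h | h
    · subst h; exact hl q (by simp)
    · exact ha r h.1

theorem pv_main (turn_belief_dict : List (String × String)) (turn_domain_flow : List String) (ordered_slot : String)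
    (hpre : ∀ p ∈ turn_belief_dict, ((PySem.Str.split? p.1 "-").getD []).length = 2) :
    process_turn_belief_dict turn_belief_dict turn_domain_flow ordered_slot
      = process_turn_belief_dict_alt turn_belief_dict turn_domain_flow ordered_slot := by
  simp only [process_turn_belief_dict, process_turn_belief_dict_alt]
  set D := pvMkDict turn_belief_dict with hDdef
  have hDnodup : D.keys.Nodup := by
    rw [hDdef, pvMkDict]
    exact PySem.Dict.nodup_keys_foldl_insert_key turn_belief_dict (fun p => p.1) (fun d p => p.2)
      PySem.Dict.empty PySem.Dict.nodup_keys_empty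
  have hp2 : ∀ p ∈ D.items, ((PySem.Str.split? p.1 "-").getD []).length = 2 := by
    rw [hDdef, pvMkDict]
    exact pv_mkdict_keyprop (fun k => ((PySem.Str.split? k "-").getD []).length = 2) turn_belief_dict PySem.Dict.empty (by intro p hp; simp [PySem.Dict.empty] at hp) hpre
  obtain ⟨H1, H2, H3, H4, H5, H6, H7⟩ :=
    pv_loop1 D hDnodup hp2 D.items (fun p hp => hp) PySem.Dict.empty PySem.Dict.empty PySem.Dict.empty
      (by intro d; rw [PySem.Dict.contains_empty, PySem.Dict.contains_empty])
      (by intro d; rw [PySem.Dict.contains_empty, PySem.Dict.contains_empty])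
      (by intro d; rw [PySem.Dict.getD_empty, PySem.Dict.getD_empty]; rfl)
      (by intro d; rw [PySem.Dict.getD_empty, PySem.Dict.getD_empty]; rfl)
      (by intro d q hq; rw [PySem.Dict.getD_empty] at hq; cases hq)
      PySem.Dict.nodup_keys_empty PySem.Dict.nodup_keys_empty
  set rA := D.items.foldl pvStepA (PySem.Dict.empty, PySem.Dict.empty) with hrA
  set gB := D.items.foldl pvStepB PySem.Dict.empty with hgB
  -- B's selection list for each domain equals the ghost grouped value
  have hsel0 : ∀ dom, (((D.items.foldl (fun acc kv => acc ++ [pvEntry kv]) []).filter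
        (fun e => e.1 == dom)).map (fun e => e.2)) = gB.getD dom [] := by
    intro dom
    rw [pv_foldl_snoc_eq_map pvEntry D.items [], List.nil_append]
    rw [List.filter_map, List.map_map, hgB, pv_gB_filter D.items PySem.Dict.empty dom,
      PySem.Dict.getD_empty, List.nil_append]
    rfl
  by_cases hos : ordered_slot = "alphabetical"
  · simp only [if_pos hos]
    simp only [hsel0]
    set G2 : String → List (String × List String) :=
      fun dom => PySem.List.sorted (gB.getD dom []) (fun t : String × List String => t.1) with hG2f
    set dl2 := rA.2.items.foldl (fun dd kv => dd.insert kv.1 (PySem.List.sorted kv.2 (fun t => t.1))) rA.2 with hdl2def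
    have hdl2 : ∀ d, dl2.getD d [] = PySem.List.sorted (rA.2.getD d []) (fun t => t.1) := by
      intro d
      rw [hdl2def, PySem.Dict.getD_eq_get?_getD, pv_get?_rebuild (fun v => PySem.List.sorted v (fun t => t.1)) rA.2 H6 d]
      cases h : rA.2.get? d with
      | none => rw [PySem.Dict.getD_eq_get?_getD, h]; rfl
      | some v => rw [PySem.Dict.getD_eq_get?_getD, h]; rfl
    have hb : ∀ d, dl2.getD d [] = (G2 d).map (fun p => (p.1, (p.2.length : Int))) := by
      intro d
      rw [hdl2 d, H4 d, hG2f]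
      exact pv_sorted_map (fun (p : String × List String) => (p.1, (p.2.length : Int))) (fun (t : String × List String) => t.1) (fun (t : String × Int) => t.1) (fun a => rfl) _
    have hc : ∀ d, rA.1.contains d = true → rA.1.getD d 0 = ((G2 d).length : Int) := by
      intro d _
      rw [H3 d, hG2f]
      simp only [PySem.List.length_sorted]
    have hc0 : ∀ d, rA.1.contains d = false → G2 d = [] := by
      intro d hd
      rw [hG2f]
      simp only
      rw [PySem.Dict.getD_of_not_contains gB [] (by rw [← H1 d]; exact hd)]
      rfl
    have h5' : ∀ d q, q ∈ G2 d → PySem.Str.split₀ (D.getD (PySem.Str.join "-" [d, q.1]) "") = q.2 := by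
      intro d q hq
      rw [hG2f] at hq
      simp only [PySem.List.mem_sorted] at hq
      exact H5 d q hq
    rw [pv_A_dnls rA.1 G2 turn_domain_flow hc hc0]
    rw [pv_A_st2 dl2 G2 turn_domain_flow hb]
    rw [pv_A_st3 D G2 turn_domain_flow h5']
    exact pv_final G2 turn_domain_flow
  · simp only [if_neg hos]
    simp only [hsel0]
    set G2 : String → List (String × List String) := fun dom => gB.getD dom [] with hG2f
    have hc : ∀ d, rA.1.contains d = true → rA.1.getD d 0 = ((G2 d).length : Int) := fun d _ => H3 d
    have hc0 : ∀ d, rA.1.contains d = false → G2 d = [] := by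
      intro d hd
      exact PySem.Dict.getD_of_not_contains gB [] (by rw [← H1 d]; exact hd)
    have h5' : ∀ d q, q ∈ G2 d → PySem.Str.split₀ (D.getD (PySem.Str.join "-" [d, q.1]) "") = q.2 := H5
    rw [pv_A_dnls rA.1 G2 turn_domain_flow hc hc0]
    rw [pv_A_st2 rA.2 G2 turn_domain_flow H4]
    rw [pv_A_st3 D G2 turn_domain_flow h5']
    exact pv_final G2 turn_domain_flow

-- ===== VERDICT (by name: the statement is the Claim_ definition above) =====
theorem process_turn_belief_dict_spec : Claim_equal_process_turn_belief_dict := by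
  intro turn_belief_dict turn_domain_flow ordered_slot _ hpre
  unfold Spec_process_turn_belief_dict
  exact pv_main turn_belief_dict turn_domain_flow ordered_slot hpre
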